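-- pv_equiv track=rewrite | github.com/bbugyi200/dotfiles | home/lib/gai/src/status_state_machine/field_updates.py | apply_status_update
-- ===== SOURCE A (Python) =====
-- def apply_status_update(lines: list[str], changespec_name: str, new_status: str) -> str:
--     """Apply STATUS field update to file lines.
--
--     Args:
--         lines: Current file lines.
--         changespec_name: NAME of the ChangeSpec to update.
--         new_status: New STATUS value.
--
--     Returns:
--         Updated file content as a string.
--     """
--     updated_lines = []
--     in_target_changespec = False
--
--     for line in lines:
--         # Check if this is a NAME field
--         if line.startswith("NAME:"):
--             current_name = line.split(":", 1)[1].strip()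
--             in_target_changespec = current_name == changespec_name
--
--         # Update STATUS if we're in the target ChangeSpec
--         if in_target_changespec and line.startswith("STATUS:"):
--             # Replace the STATUS line
--             updated_lines.append(f"STATUS: {new_status}\n")
--             in_target_changespec = False  # Done updating this ChangeSpec
--         else:
--             updated_lines.append(line)
--
--     return "".join(updated_lines)
-- ===== SOURCE B (Python) =====
-- def apply_status_update(lines: list[str], changespec_name: str, new_status: str) -> str:
--     """Segment-based rewrite: group lines into a preamble and NAME-blocks, then
--     patch the first STATUS line of each matching block."""
--     preamble = []
--     blocks = []
--     for line in lines:
--         if line.startswith("NAME:"):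
--             blocks.append([line])
--         elif blocks:
--             blocks[-1].append(line)
--         else:
--             preamble.append(line)
--     out = preamble
--     for block in blocks:
--         if block[0].split(":", 1)[1].strip() == changespec_name:
--             for j, line in enumerate(block):
--                 if line.startswith("STATUS:"):
--                     block = block[:j] + [f"STATUS: {new_status}\n"] + block[j + 1:]
--                     break
--         out.extend(block)
--     return "".join(out)
-- ===== Notes on version B (the rewrite author's own statement) =====
-- stated objective: alternative
-- what changed: B replaces A's running in-target boolean flag by a two-phase decomposition: one grouping pass that splits the lines into a preamble plus one segment per NAME: line, then a per-block patch that replaces only the first STATUS: line of each block whose name matches.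
import Mathlib
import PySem

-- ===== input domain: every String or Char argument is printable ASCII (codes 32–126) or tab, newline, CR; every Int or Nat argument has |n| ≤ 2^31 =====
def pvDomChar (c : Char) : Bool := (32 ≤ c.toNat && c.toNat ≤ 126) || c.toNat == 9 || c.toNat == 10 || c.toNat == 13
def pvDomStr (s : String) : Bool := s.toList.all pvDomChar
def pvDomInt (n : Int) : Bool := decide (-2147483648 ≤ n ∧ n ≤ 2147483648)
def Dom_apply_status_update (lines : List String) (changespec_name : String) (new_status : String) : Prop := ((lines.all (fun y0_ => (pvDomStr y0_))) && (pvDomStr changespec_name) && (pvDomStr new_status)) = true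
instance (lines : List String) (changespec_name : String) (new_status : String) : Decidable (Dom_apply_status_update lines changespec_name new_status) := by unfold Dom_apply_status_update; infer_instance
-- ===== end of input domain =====

-- B replaces A's single pass with a running in-target flag by a two-phase decomposition
-- (group lines into preamble + one block per "NAME:" line, then patch each matching
-- block's first "STATUS:" line); same cost, different structure (objective: alternative).

-- ===== PORT A =====
-- line.split(":", 1)[1].strip()  (the same expression occurs in both Pythons; index 1
-- always exists where it is evaluated, because the line starts with "NAME:", so the
-- getD defaults are unreachable)
def pvNameOf (line : String) : String :=
  PySem.Str.strip (((PySem.Str.splitMax? line ":" 1).getD []).getD 1 "")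

-- A's loop over `lines` carrying the in_target_changespec flag
def pvGoA (changespec_name new_status : String) : List String → Bool → List String
  | [], _ => []
  | line :: rest, flag =>
    let flag' := if PySem.Str.startswith line "NAME:" then pvNameOf line == changespec_name else flag
    if flag' && PySem.Str.startswith line "STATUS:" then
      ("STATUS: " ++ new_status ++ "\n") :: pvGoA changespec_name new_status rest false
    else
      line :: pvGoA changespec_name new_status rest flag'

def apply_status_update (lines : List String) (changespec_name : String) (new_status : String) : String :=
  PySem.Str.join "" (pvGoA changespec_name new_status lines false)

-- ===== PORT B =====
-- grouping step of Source B's first loop: state = (preamble, blocks); blocks[-1] is getLastD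
def pvSegStep (st : List String × List (List String)) (line : String) : List String × List (List String) :=
  if PySem.Str.startswith line "NAME:" then (st.1, st.2 ++ [[line]])
  else
    match st.2 with
    | [] => (st.1 ++ [line], [])
    | b :: bs => (st.1, (b :: bs).dropLast ++ [(b :: bs).getLastD [] ++ [line]])

-- Source B's inner loop: replace the first "STATUS:" line of a block, keep the rest
def pvReplFirst (new_status : String) : List String → List String
  | [] => []
  | line :: rest =>
    if PySem.Str.startswith line "STATUS:" then ("STATUS: " ++ new_status ++ "\n") :: rest
    else line :: pvReplFirst new_status rest

def pvPatchBlock (changespec_name new_status : String) (blk : List String) : List String :=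
  if pvNameOf (blk.headD "") == changespec_name then pvReplFirst new_status blk else blk

def apply_status_update_alt (lines : List String) (changespec_name : String) (new_status : String) : String :=
  let st := lines.foldl pvSegStep ([], [])
  PySem.Str.join "" (st.1 ++ (st.2.map (pvPatchBlock changespec_name new_status)).flatten)

-- ===== PRECONDITION & SPEC =====
def Spec_apply_status_update (lines : List String) (changespec_name : String) (new_status : String) (out : String) : Prop := out = apply_status_update_alt lines changespec_name new_status
instance (lines : List String) (changespec_name : String) (new_status : String) (out : String) : Decidable (Spec_apply_status_update lines changespec_name new_status out) := by unfold Spec_apply_status_update; infer_instance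

-- ===== CLAIM (what is proved, stated in full; the proofs are below) =====
def Claim_equal_apply_status_update : Prop := ∀ (lines : List String) (changespec_name : String) (new_status : String), Dom_apply_status_update lines changespec_name new_status → Spec_apply_status_update lines changespec_name new_status (apply_status_update lines changespec_name new_status)

-- ===== LEMMAS AND PROOFS =====

-- a line starting with "NAME:" does not start with "STATUS:"
lemma pv_name_not_status {l : String} (h : PySem.Str.startswith l "NAME:" = true) :
    PySem.Str.startswith l "STATUS:" = false := by
  simp only [PySem.Str.startswith_eq] at h ⊢
  rw [PySem.Chars.startswith_iff] at h
  rw [← Bool.not_eq_true, PySem.Chars.startswith_iff]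
  obtain ⟨t, ht⟩ := h
  rintro ⟨u, hu⟩
  rw [← ht] at hu
  simp at hu

-- block shape: a "NAME:" head followed by NAME-free lines
def pvBlockShape (blk : List String) : Prop :=
  ∃ hd tl, blk = hd :: tl ∧ PySem.Str.startswith hd "NAME:" = true ∧
    ∀ l ∈ tl, PySem.Str.startswith l "NAME:" = false

-- A's loop copies a NAME-free prefix unchanged while the flag is off
lemma pv_goA_pre (n s : String) (pre rest : List String)
    (h : ∀ l ∈ pre, PySem.Str.startswith l "NAME:" = false) :
    pvGoA n s (pre ++ rest) false = pre ++ pvGoA n s rest false := by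
  induction pre with
  | nil => rfl
  | cons l pre' ih =>
    have hl := h l (List.mem_cons_self ..)
    simp at hl
    simp [pvGoA, hl, ih (fun x hx => h x (List.mem_cons_of_mem _ hx))]

-- A's loop on a NAME-free run with flag m: replace first STATUS iff m, flag off once replaced
lemma pv_goA_tail (n s : String) (t : List String)
    (h : ∀ l ∈ t, PySem.Str.startswith l "NAME:" = false) :
    ∀ (m : Bool) (rest : List String),
      pvGoA n s (t ++ rest) m =
        (if m then pvReplFirst s t else t) ++
          pvGoA n s rest (m && !(t.any (fun l => PySem.Str.startswith l "STATUS:"))) := by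
  induction t with
  | nil => intro m rest; cases m <;> simp [pvReplFirst]
  | cons l t' ih =>
    intro m rest
    have hl := h l (List.mem_cons_self ..)
    simp at hl
    have ih' := ih (fun x hx => h x (List.mem_cons_of_mem _ hx))
    cases m with
    | false =>
      simp [pvGoA, hl, ih' false rest]
    | true =>
      by_cases hs : PySem.Chars.startswith l.toList ['S', 'T', 'A', 'T', 'U', 'S', ':'] = true
      · simp [pvGoA, hl, hs, ih' false rest, pvReplFirst]
      · have hs' : PySem.Chars.startswith l.toList ['S', 'T', 'A', 'T', 'U', 'S', ':'] = false := by
          simpa using hs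
        simp [pvGoA, hl, hs', ih' true rest, pvReplFirst]

-- over a concatenation of well-shaped blocks, A's loop (from any flag) = B's per-block patch
lemma pv_goA_blocks (n s : String) (blocks : List (List String))
    (h : ∀ blk ∈ blocks, pvBlockShape blk) :
    ∀ b : Bool, pvGoA n s blocks.flatten b = (blocks.map (pvPatchBlock n s)).flatten := by
  induction blocks with
  | nil => intro b; rfl
  | cons blk bs ih =>
    intro b
    obtain ⟨hd, tl, rfl, hhd, htl⟩ := h blk (List.mem_cons_self ..)
    have ih' := ih (fun x hx => h x (List.mem_cons_of_mem _ hx))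
    have hns := pv_name_not_status hhd
    simp only [List.flatten_cons, List.cons_append]
    simp only [pvGoA, hhd, hns, if_true, Bool.and_false, Bool.false_eq_true, if_false]
    rw [pv_goA_tail n s tl htl _ bs.flatten, ih']
    simp only [List.map_cons, List.flatten_cons, pvPatchBlock, List.headD_cons]
    by_cases hm : (pvNameOf hd == n) = true
    · have hnsC : PySem.Chars.startswith hd.toList ['S', 'T', 'A', 'T', 'U', 'S', ':'] = false := by
        simpa using hns
      simp [hm, pvReplFirst, hnsC]
    · simp only [Bool.not_eq_true] at hm
      simp [hm]

-- B's grouping pass: it partitions the input into a NAME-free preamble and well-shaped blocks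
lemma pv_seg_inv (lines : List String) :
    lines = (lines.foldl pvSegStep ([], [])).1 ++ (lines.foldl pvSegStep ([], [])).2.flatten ∧
    (∀ l ∈ (lines.foldl pvSegStep ([], [])).1, PySem.Str.startswith l "NAME:" = false) ∧
    (∀ blk ∈ (lines.foldl pvSegStep ([], [])).2, pvBlockShape blk) := by
  induction lines using List.reverseRecOn with
  | nil => simp
  | append_singleton xs x ih =>
    obtain ⟨h1, h2, h3⟩ := ih
    rw [List.foldl_append]
    set st := xs.foldl pvSegStep ([], []) with hst
    simp only [List.foldl_cons, List.foldl_nil]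
    by_cases hx : PySem.Str.startswith x "NAME:" = true
    · rw [pvSegStep, if_pos hx]
      refine ⟨?_, h2, ?_⟩
      · simp only [List.flatten_append, List.flatten_cons, List.flatten_nil, List.append_nil]
        rw [← List.append_assoc, ← h1]
      · intro blk hblk
        rcases List.mem_append.1 hblk with hb | hb
        · exact h3 blk hb
        · simp at hb
          exact ⟨x, [], by simp [hb], hx, by simp⟩
    · have hx' : PySem.Str.startswith x "NAME:" = false := by simpa using hx
      rw [pvSegStep, if_neg (by simpa using hx)]
      cases hbs : st.2 with
      | nil =>
        refine ⟨?_, ?_, by simp⟩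
        · simp only []
          rw [h1, hbs]
          simp
        · intro l hl
          simp only [] at hl
          rcases List.mem_append.1 hl with h | h
          · exact h2 l h
          · simp at h; subst h; exact hx'
      | cons b bs =>
        have hdg : ((b :: bs).dropLast ++ [(b :: bs).getLastD []] : List (List String)) = b :: bs :=
          List.dropLast_append_getLast? ((b :: bs).getLastD []) rfl
        refine ⟨?_, h2, ?_⟩
        · simp only []
          rw [h1, hbs]
          conv_lhs => rw [← hdg]
          simp [List.flatten_append, List.append_assoc]
        · intro blk hblk
          simp only [] at hblk
          rcases List.mem_append.1 hblk with hb | hb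
          · exact h3 blk (by rw [hbs]; exact List.dropLast_subset _ hb)
          · simp at hb
            obtain ⟨hd, tl, he, hh, ht⟩ :=
              h3 _ (by rw [hbs]; exact (List.mem_of_getLast? rfl : (b :: bs).getLastD [] ∈ b :: bs))
            refine ⟨hd, tl ++ [x],
              by rw [hb, show ((b :: bs).getLast?.getD [] : List String) = (b :: bs).getLastD []
                       from List.getLastD_eq_getLast?.symm, he]; simp, hh, ?_⟩
            intro l hl
            rcases List.mem_append.1 hl with h | h
            · exact ht l h
            · simp at h; subst h; exact hx'

-- ===== VERDICT (by name: the statement is the Claim_ definition above) =====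
theorem apply_status_update_spec : Claim_equal_apply_status_update := by
  intro lines n s _
  unfold Spec_apply_status_update apply_status_update apply_status_update_alt
  obtain ⟨hsplit, hpre, hblocks⟩ := pv_seg_inv lines
  conv_lhs => rw [hsplit]
  rw [pv_goA_pre n s _ _ hpre, pv_goA_blocks n s _ hblocks false]
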